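-- pv_equiv track=rewrite | github.com/Pechouille/beets_vs_weeds | weeds_detector/ml_logic/model_UNET.py | pair_files_image_mask
-- ===== SOURCE A (Python) =====
-- def pair_files_image_mask(image_paths, mask_paths):
--     """Pair each image with its corresponding mask using filenames."""
--     mask_dict = { mask[1]: mask[0] for mask in mask_paths}
--     pair_urls = []
--     counter = 1
--     for image_url, image_filename in image_paths:
--         if image_filename in mask_dict:
--                 pair_urls.append([image_url, mask_dict[image_filename]])
--                 counter += 1
--
--     return pair_urls
-- ===== SOURCE B (Python) =====
-- def pair_files_image_mask(image_paths, mask_paths):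
--     """Pair each image with its corresponding mask using filenames."""
--     pair_urls = []
--     for image_url, image_filename in image_paths:
--         matched = None
--         for mask_url, mask_filename in mask_paths:
--             if mask_filename == image_filename:
--                 matched = mask_url
--         if matched is not None:
--             pair_urls.append([image_url, matched])
--     return pair_urls
-- ===== Notes on version B (the rewrite author's own statement) =====
-- stated objective: alternative
-- what changed: Replaced the prebuilt mask filename dict with a direct nested scan: for each image B rescans mask_paths and keeps the last matching mask URL (matching A's dict-overwrite semantics), with no index structure.
import Mathlib
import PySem

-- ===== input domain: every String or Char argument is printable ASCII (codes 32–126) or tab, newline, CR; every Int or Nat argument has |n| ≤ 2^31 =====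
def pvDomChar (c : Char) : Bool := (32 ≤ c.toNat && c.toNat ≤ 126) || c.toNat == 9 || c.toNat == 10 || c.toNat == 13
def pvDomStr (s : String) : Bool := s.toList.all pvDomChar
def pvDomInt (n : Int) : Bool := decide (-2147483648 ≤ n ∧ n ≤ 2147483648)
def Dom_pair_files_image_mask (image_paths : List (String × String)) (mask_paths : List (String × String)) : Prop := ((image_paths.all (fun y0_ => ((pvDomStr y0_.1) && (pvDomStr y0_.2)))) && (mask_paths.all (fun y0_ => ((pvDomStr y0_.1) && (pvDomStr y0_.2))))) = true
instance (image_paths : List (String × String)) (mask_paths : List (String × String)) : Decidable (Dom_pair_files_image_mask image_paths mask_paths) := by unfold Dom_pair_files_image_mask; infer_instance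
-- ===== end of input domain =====

-- B replaces A's prebuilt mask-filename dict with a direct nested scan (last match wins); alternative decomposition, not faster.

-- ===== PORT A =====
def pair_files_image_mask (image_paths : List (String × String)) (mask_paths : List (String × String)) : List (List String) :=
  -- mask_dict = { mask[1]: mask[0] for mask in mask_paths }
  let mask_dict : PySem.Dict String String :=
    mask_paths.foldl (fun d mask => d.insert mask.2 mask.1) PySem.Dict.empty
  -- for image_url, image_filename in image_paths: if image_filename in mask_dict: append
  let pair_urls : List (List String) :=
    image_paths.foldl (fun pair_urls p =>
      if mask_dict.contains p.2 then
        pair_urls ++ [[p.1, mask_dict.getD p.2 ""]]   -- lookup cannot fail here (contains holds)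
      else pair_urls) []
  pair_urls

-- ===== PORT B =====
def pair_files_image_mask_alt (image_paths : List (String × String)) (mask_paths : List (String × String)) : List (List String) :=
  image_paths.foldl (fun pair_urls p =>
    let matched : Option String :=
      mask_paths.foldl (fun acc mask => if mask.2 == p.2 then some mask.1 else acc) none
    match matched with
    | some m => pair_urls ++ [[p.1, m]]
    | none => pair_urls) []

-- ===== PRECONDITION & SPEC =====
def Spec_pair_files_image_mask (image_paths : List (String × String)) (mask_paths : List (String × String)) (out : List (List String)) : Prop := out = pair_files_image_mask_alt image_paths mask_paths
instance (image_paths : List (String × String)) (mask_paths : List (String × String)) (out : List (List String)) : Decidable (Spec_pair_files_image_mask image_paths mask_paths out) := by unfold Spec_pair_files_image_mask; infer_instance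

-- ===== CLAIM (what is proved, stated in full; the proofs are below) =====
def Claim_equal_pair_files_image_mask : Prop := ∀ (image_paths : List (String × String)) (mask_paths : List (String × String)), Dom_pair_files_image_mask image_paths mask_paths → Spec_pair_files_image_mask image_paths mask_paths (pair_files_image_mask image_paths mask_paths)

-- ===== LEMMAS AND PROOFS =====

-- the dict built by A answers get? with the last matching mask, i.e. B's inner scan
theorem get?_foldl_insert_eq_scan (ms : List (String × String)) (d : PySem.Dict String String) (f : String) :
    (ms.foldl (fun d mask => d.insert mask.2 mask.1) d).get? f
      = ms.foldl (fun acc mask => if mask.2 == f then some mask.1 else acc) (d.get? f) := by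
  induction ms generalizing d with
  | nil => rfl
  | cons m rest ih =>
      simp only [List.foldl_cons, ih]
      congr 1
      rw [PySem.Dict.get?_insert]
      by_cases h : m.2 = f
      · simp [h]
      · simp [h, Ne.symm h, beq_iff_eq]

theorem pair_files_image_mask_spec : Claim_equal_pair_files_image_mask := by
  intro image_paths mask_paths _
  unfold Spec_pair_files_image_mask pair_files_image_mask pair_files_image_mask_alt
  simp only []
  apply PySem.List.foldl_congr_mem
  intro acc p _
  rw [PySem.Dict.contains_eq_isSome_get?, get?_foldl_insert_eq_scan, PySem.Dict.getD_eq_get?_getD,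
      get?_foldl_insert_eq_scan]
  simp only [PySem.Dict.get?_empty]
  cases mask_paths.foldl (fun acc mask => if mask.2 == p.2 then some mask.1 else acc) none <;>
    simp
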